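-- pv_equiv track=rewrite | github.com/salman6049/Dynamic-Programming | Absolute Element Sums.py | playingWithNumbers
-- ===== SOURCE A (Python) =====
-- def playingWithNumbers(arr, queries):
--     LEN = 4003  # 2000 - (-2000) + 1 + 2
--     LAST_INDEX = LEN-1
--     SHIFT = 2001  # 2000 + 1
--     counts = [0]*LEN
--     for a in arr:
--         new_a = a+SHIFT
--         counts[new_a] += 1
--
--     incremental_counts = [0]*len(counts)
--     incremental_sum = [0]*len(counts)
--     incremental_sumn = [0]*len(counts)  # summing negatives
--     for i in range(len(counts)):
--         # here is a hack:
--         # Incremental_counts[i-1] == incremental_counts[-1] when i == 0,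
--         # but last element of incremental_counts is initialized with 0
--         # It's exactly what we need, so we do not need 'if'-check for border condition
--         incremental_counts[i] = counts[i] + incremental_counts[i-1]
--         incremental_sum[i] = counts[i]*i + incremental_sum[i-1]
--         incremental_sumn[i] = counts[i]*(LAST_INDEX-i) + incremental_sumn[i-1]
--
--     results = []
--     result_cache = {}
--     tot_q = 0
--     for q in queries:
--         tot_q += q
--         if tot_q not in result_cache:
--             shift = SHIFT-tot_q
--             index = max(min(SHIFT-tot_q, LAST_INDEX), 0)
--             result = (
--                 (
--                     incremental_sum[-1] - incremental_sum[index]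
--                     - shift*(incremental_counts[-1]-incremental_counts[index])
--                 )
--                 + (
--                     incremental_sumn[index]
--                     - (LAST_INDEX-shift)*(incremental_counts[index])
--                 )
--             )
--             result_cache[tot_q] = result
--         results.append(result_cache[tot_q])
--     return results
-- ===== SOURCE B (Python) =====
-- def playingWithNumbers(arr, queries):
--     LEN = 4003  # 2000 - (-2000) + 1 + 2
--     SHIFT = 2001  # 2000 + 1
--     counts = [0]*LEN
--     for a in arr:
--         counts[a+SHIFT] += 1
--
--     results = []
--     result_cache = {}
--     tot_q = 0
--     for q in queries:
--         tot_q += q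
--         if tot_q not in result_cache:
--             shift = SHIFT - tot_q
--             result_cache[tot_q] = sum(counts[i]*abs(i-shift) for i in range(LEN))
--         results.append(result_cache[tot_q])
--     return results
-- ===== Notes on version B (the rewrite author's own statement) =====
-- stated objective: simpler
-- what changed: B keeps A's histogram build but drops the three incremental prefix arrays and A's clamped closed-form expression: each distinct cumulative query total is answered by one direct rescan sum(counts[i]*abs(i-shift)), cached by total.
-- intended difference: When arr contains -2001 (or -6004, which wraps onto the same bucket) and some cumulative query total exceeds 2001, A's clamp 'index = max(min(...),0)' gives the element in bucket 0 distance shift (negative) instead of |shift|, so A undercounts (e.g. A returns [-999] on ([-2001],[3000])); B's abs() returns the true distance sum [999], which is the intended value. — e.g. on playingWithNumbers([-2001], [3000]): A returns [-999], B returns [999]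
import Mathlib
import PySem

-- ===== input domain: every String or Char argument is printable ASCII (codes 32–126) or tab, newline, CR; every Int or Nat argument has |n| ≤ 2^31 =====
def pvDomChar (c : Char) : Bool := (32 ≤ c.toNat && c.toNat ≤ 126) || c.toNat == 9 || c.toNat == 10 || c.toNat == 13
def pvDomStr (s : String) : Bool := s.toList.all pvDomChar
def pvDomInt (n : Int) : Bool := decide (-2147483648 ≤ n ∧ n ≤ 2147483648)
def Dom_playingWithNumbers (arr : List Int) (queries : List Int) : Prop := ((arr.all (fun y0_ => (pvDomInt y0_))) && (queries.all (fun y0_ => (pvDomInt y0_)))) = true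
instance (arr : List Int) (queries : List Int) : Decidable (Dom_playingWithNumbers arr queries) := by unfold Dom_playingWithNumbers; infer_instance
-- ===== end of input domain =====

-- B keeps A's histogram build but drops the three incremental prefix arrays and the clamped
-- closed form: each distinct cumulative query total is answered by one direct rescan of the
-- histogram with abs(), cached by total (objective: simpler; not faster).

-- ===== PORT A =====
-- counts = [0]*4003; for a in arr: counts[a+2001] += 1   (this line is identical in A and in B)
def pvCounts (arr : List Int) : List Int :=
  arr.foldl
    (fun counts a =>
      let new_a : Int := a + 2001
      PySem.List.pySetD counts new_a (PySem.List.pyGetD counts new_a 0 + 1))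
    (List.replicate 4003 0)

-- the three incremental arrays of A, built by the range(len(counts)) loop with the [-1] hack
def pvPrefixLoop (counts : List Int) : List Int × List Int × List Int :=
  (PySem.List.pyRange 0 (counts.length : Int) 1).foldl
    (fun (st : List Int × List Int × List Int) i =>
      let ic := PySem.List.pySetD st.1 i
        (PySem.List.pyGetD counts i 0 + PySem.List.pyGetD st.1 (i - 1) 0)
      let isum := PySem.List.pySetD st.2.1 i
        (PySem.List.pyGetD counts i 0 * i + PySem.List.pyGetD st.2.1 (i - 1) 0)
      let isumn := PySem.List.pySetD st.2.2 i
        (PySem.List.pyGetD counts i 0 * (4002 - i) + PySem.List.pyGetD st.2.2 (i - 1) 0)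
      (ic, isum, isumn))
    (List.replicate counts.length 0, List.replicate counts.length 0, List.replicate counts.length 0)

def playingWithNumbers (arr : List Int) (queries : List Int) : List Int :=
  let counts := pvCounts arr
  let p := pvPrefixLoop counts
  (queries.foldl
    (fun (st : List Int × PySem.Dict Int Int × Int) q =>
      let tot := st.2.2 + q
      let cache :=
        if (st.2.1.get? tot).isSome then st.2.1
        else
          let shift : Int := 2001 - tot
          let index : Int := max (min (2001 - tot) 4002) 0
          let result :=
            (PySem.List.pyGetD p.2.1 (-1) 0 - PySem.List.pyGetD p.2.1 index 0
              - shift * (PySem.List.pyGetD p.1 (-1) 0 - PySem.List.pyGetD p.1 index 0))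
            + (PySem.List.pyGetD p.2.2 index 0 - (4002 - shift) * PySem.List.pyGetD p.1 index 0)
          st.2.1.insert tot result
      (st.1 ++ [cache.getD tot 0], cache, tot))
    ([], PySem.Dict.empty, 0)).1

-- ===== PORT B =====
def playingWithNumbers_alt (arr : List Int) (queries : List Int) : List Int :=
  let counts := pvCounts arr
  (queries.foldl
    (fun (st : List Int × PySem.Dict Int Int × Int) q =>
      let tot := st.2.2 + q
      let cache :=
        if (st.2.1.get? tot).isSome then st.2.1
        else
          let shift : Int := 2001 - tot
          let result :=
            (PySem.List.pyRange 0 4003 1).foldl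
              (fun acc i => acc + PySem.List.pyGetD counts i 0 * |i - shift|) 0
          st.2.1.insert tot result
      (st.1 ++ [cache.getD tot 0], cache, tot))
    ([], PySem.Dict.empty, 0)).1

-- ===== PRECONDITION & SPEC =====
-- Pre_ excludes exactly the inputs on which A raises IndexError: an element a with a+2001
-- outside [-4003, 4002] (counts has length 4003; Python indexing accepts indices down to -4003).
def Pre_playingWithNumbers (arr : List Int) (queries : List Int) : Prop :=
  ∀ a ∈ arr, -6004 ≤ a ∧ a ≤ 2001
instance (arr : List Int) (queries : List Int) : Decidable (Pre_playingWithNumbers arr queries) := by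
  unfold Pre_playingWithNumbers; infer_instance
def pvWitness_playingWithNumbers : List Int × List Int := ([0, -2000, 2001], [5, -5, 7])

-- A returns the wrong value when arr holds an element in histogram bucket 0 (a = -2001, or
-- a = -6004, which Python's negative indexing wraps onto the same bucket) and some cumulative
-- query total exceeds 2001: A's clamped formula then counts that bucket with the negative
-- distance shift = 2001 - tot instead of |shift| (A returns [-999] on ([-2001],[3000])),
-- while B's abs() rescan returns the true distance sum ([999]), the intended value.
def D_playingWithNumbers (arr : List Int) (queries : List Int) : Prop :=
  ((-2001 : Int) ∈ arr ∨ (-6004 : Int) ∈ arr) ∧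
    ∃ k ∈ List.range (queries.length + 1), 2001 < (queries.take k).sum
instance (arr : List Int) (queries : List Int) : Decidable (D_playingWithNumbers arr queries) := by
  unfold D_playingWithNumbers; infer_instance

def Spec_playingWithNumbers (arr : List Int) (queries : List Int) (out : List Int) : Prop :=
  ¬ D_playingWithNumbers arr queries → out = playingWithNumbers_alt arr queries
instance (arr : List Int) (queries : List Int) (out : List Int) : Decidable (Spec_playingWithNumbers arr queries out) := by
  unfold Spec_playingWithNumbers; infer_instance

def pvDiffWitness_playingWithNumbers : List Int × List Int := ([-2001], [3000])
def pvDiffWitnessOut_playingWithNumbers : (List Int) × (List Int) := ([-999], [999])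

-- ===== CLAIM (what is proved, stated in full; the proofs are below) =====
def Claim_unchanged_playingWithNumbers : Prop := ∀ (arr : List Int) (queries : List Int), Dom_playingWithNumbers arr queries → Pre_playingWithNumbers arr queries → Spec_playingWithNumbers arr queries (playingWithNumbers arr queries)
def Claim_changed_playingWithNumbers : Prop := Dom_playingWithNumbers (pvDiffWitness_playingWithNumbers.1) (pvDiffWitness_playingWithNumbers.2) ∧ Pre_playingWithNumbers (pvDiffWitness_playingWithNumbers.1) (pvDiffWitness_playingWithNumbers.2) ∧ D_playingWithNumbers (pvDiffWitness_playingWithNumbers.1) (pvDiffWitness_playingWithNumbers.2) ∧ playingWithNumbers (pvDiffWitness_playingWithNumbers.1) (pvDiffWitness_playingWithNumbers.2) = pvDiffWitnessOut_playingWithNumbers.1 ∧ playingWithNumbers_alt (pvDiffWitness_playingWithNumbers.1) (pvDiffWitness_playingWithNumbers.2) = pvDiffWitnessOut_playingWithNumbers.2 ∧ pvDiffWitnessOut_playingWithNumbers.1 ≠ pvDiffWitnessOut_playingWithNumbers.2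
def Claim_exact_playingWithNumbers : Prop := ∀ (arr : List Int) (queries : List Int), Dom_playingWithNumbers arr queries → Pre_playingWithNumbers arr queries → D_playingWithNumbers arr queries → playingWithNumbers arr queries ≠ playingWithNumbers_alt arr queries

-- ===== LEMMAS AND PROOFS =====

def pvArrStep (g : Int → Int) (l : List Int) (i : Int) : List Int :=
  PySem.List.pySetD l i (g i + PySem.List.pyGetD l (i - 1) 0)

def pvAcc (g : Int → Int) (k : Nat) : List Int :=
  (PySem.List.pyRange 0 (k : Int) 1).foldl (pvArrStep g) (List.replicate 4003 0)

def pvSum (g : Int → Int) (m : Nat) : Int := ∑ t ∈ Finset.range (m + 1), g (t : Int)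

theorem pvAcc_length (g : Int → Int) (k : Nat) : (pvAcc g k).length = 4003 := by
  induction k with
  | zero =>
    have h0 : pvAcc g 0 = List.replicate 4003 0 := by
      rw [pvAcc]; norm_num [PySem.List.pyRange_one_eq_nil (le_refl (0:Int))]
    rw [h0, List.length_replicate]
  | succ k ih =>
    have hsplit : PySem.List.pyRange 0 ((k:Int)+1) 1
        = PySem.List.pyRange 0 (k:Int) 1 ++ [(k:Int)] :=
      PySem.List.pyRange_one_succ_right (by positivity)
    have : ((k+1 : Nat) : Int) = (k:Int) + 1 := by push_cast; ring
    have hstep : pvAcc g (k+1) = pvArrStep g (pvAcc g k) (k:Int) := by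
      simp only [pvAcc, this, hsplit, List.foldl_append, List.foldl_cons, List.foldl_nil]
    rw [hstep, pvArrStep, PySem.List.length_pySetD, ih]

theorem pvAcc_getD (g : Int → Int) (k : Nat) (hk : k ≤ 4003) :
    ∀ j : Nat, j < 4003 → (pvAcc g k).getD j 0 = if j < k then pvSum g j else 0 := by
  induction k with
  | zero =>
    intro j hj
    have h0 : pvAcc g 0 = List.replicate 4003 0 := by
      rw [pvAcc]; norm_num [PySem.List.pyRange_one_eq_nil (le_refl (0:Int))]
    rw [h0, List.getD_eq_getElem?_getD, List.getElem?_replicate, if_pos hj,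
      if_neg (Nat.not_lt_zero j)]
    rfl
  | succ k ih =>
    intro j hj
    have hk' : k ≤ 4003 := Nat.le_of_succ_le hk
    have hklt : k < 4003 := hk
    have hcast : ((k+1 : Nat) : Int) = (k:Int) + 1 := by push_cast; ring
    have hsplit : PySem.List.pyRange 0 ((k:Int)+1) 1
        = PySem.List.pyRange 0 (k:Int) 1 ++ [(k:Int)] :=
      PySem.List.pyRange_one_succ_right (by positivity)
    have hstep : pvAcc g (k+1) = pvArrStep g (pvAcc g k) (k:Int) := by
      simp only [pvAcc, hcast, hsplit, List.foldl_append, List.foldl_cons, List.foldl_nil]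
    have hlen : (pvAcc g k).length = 4003 := pvAcc_length g k
    -- the value read at index k-1 (Python's [-1] hack at k = 0)
    have hread : PySem.List.pyGetD (pvAcc g k) ((k:Int) - 1) 0
        = if k = 0 then 0 else pvSum g (k-1) := by
      rcases Nat.eq_zero_or_pos k with h0 | hpos
      · subst h0
        have hne : pvAcc g 0 ≠ [] := by
          intro h; rw [h] at hlen; simp at hlen
        have := PySem.List.pyGetD_neg_one (xs := pvAcc g 0) (d := 0) hne
        simp only [Nat.cast_zero, zero_sub] at *
        rw [this, List.getLast_eq_getElem]
        have h4002 : (pvAcc g 0).getD 4002 0 = 0 := by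
          simpa using ih (Nat.le_of_succ_le hk) 4002 (by omega)
        rw [List.getD_eq_getElem?_getD, List.getElem?_eq_getElem (by omega)] at h4002
        simpa [hlen] using h4002
      · have hc : (k:Int) - 1 = ((k-1 : Nat) : Int) := by omega
        rw [hc, PySem.List.pyGetD_natCast]
        rw [ih hk' (k-1) (by omega)]
        simp [Nat.sub_lt hpos, Nat.pos_iff_ne_zero.mp hpos]
    have hval : g (k:Int) + PySem.List.pyGetD (pvAcc g k) ((k:Int) - 1) 0 = pvSum g k := by
      rw [hread]
      rcases Nat.eq_zero_or_pos k with h0 | hpos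
      · subst h0; simp [pvSum]
      · have h1 : k - 1 + 1 = k := by omega
        rw [if_neg (by omega), pvSum, pvSum, h1, Finset.sum_range_succ]
        ring
    rw [hstep, pvArrStep, hval, PySem.List.pySetD_natCast]
    rw [List.getD_eq_getElem?_getD, List.getElem?_set]
    rcases eq_or_ne k j with rfl | hne
    · simp [hlen, hj]
    · rw [if_neg hne, ← List.getD_eq_getElem?_getD, ih hk' j hj]
      rcases lt_or_ge j k with hlt | hge
      · rw [if_pos hlt, if_pos (by omega)]
      · rw [if_neg (by omega), if_neg (by omega)]

theorem pvFoldl_prod3 {ι α β γ : Type} (l : List ι) (f1 : α → ι → α) (f2 : β → ι → β)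
    (f3 : γ → ι → γ) (a : α) (b : β) (c : γ) :
    l.foldl (fun st i => (f1 st.1 i, f2 st.2.1 i, f3 st.2.2 i)) (a, b, c)
      = (l.foldl f1 a, l.foldl f2 b, l.foldl f3 c) := by
  induction l generalizing a b c with
  | nil => rfl
  | cons x xs ih => simpa using ih (f1 a x) (f2 b x) (f3 c x)

theorem pvListSumRange (f : Nat → Int) (n : Nat) :
    ((List.range n).map f).sum = ∑ k ∈ Finset.range n, f k := by
  induction n with
  | zero => simp
  | succ n ih => simp [List.range_succ, Finset.sum_range_succ, ih]

-- value at index 4002 never written with a nonzero: last element of pvAcc g 4003 read as [-1]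
theorem pv_getD_neg_one {xs : List Int} (h : xs.length = 4003) :
    PySem.List.pyGetD xs (-1) 0 = xs.getD 4002 0 := by
  have hne : xs ≠ [] := by intro hx; rw [hx] at h; simp at h
  have hidx : xs.length - 1 = 4002 := by omega
  rw [PySem.List.pyGetD_neg_one (xs := xs) (d := 0) hne, List.getLast_eq_getElem,
    List.getD_eq_getElem?_getD, List.getElem?_eq_getElem (by omega)]
  simp only [hidx]
  rfl

theorem pvAcc_last (g : Int → Int) :
    PySem.List.pyGetD (pvAcc g 4003) (-1) 0 = pvSum g 4002 := by
  rw [pv_getD_neg_one (pvAcc_length g 4003)]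
  have h := pvAcc_getD g 4003 (le_refl _) 4002 (by omega)
  rw [if_pos (by omega)] at h
  exact h

theorem pvAcc_at (g : Int → Int) (i : Int) (h0 : 0 ≤ i) (h1 : i ≤ 4002) :
    PySem.List.pyGetD (pvAcc g 4003) i 0 = pvSum g i.toNat := by
  have hc : i = ((i.toNat : Nat) : Int) := by omega
  rw [hc, PySem.List.pyGetD_natCast, pvAcc_getD g 4003 (le_refl _) i.toNat (by omega),
    if_pos (by omega), Int.toNat_natCast]

def pvCStep (counts : List Int) (a : Int) : List Int :=
  PySem.List.pySetD counts (a + 2001) (PySem.List.pyGetD counts (a + 2001) 0 + 1)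

theorem pvCStep_length (counts : List Int) (a : Int) :
    (pvCStep counts a).length = counts.length := by
  rw [pvCStep, PySem.List.length_pySetD]

theorem pvCStep_getD_zero (counts : List Int) (a : Int) (hlen : counts.length = 4003)
    (ha1 : a ≠ -2001) (ha2 : a ≠ -6004) :
    (pvCStep counts a).getD 0 0 = counts.getD 0 0 := by
  rw [pvCStep, PySem.List.pySetD, PySem.List.pySet?, PySem.List.pyIdx?, hlen]
  split_ifs with h1 h2 h3
  · -- 0 ≤ a+2001 < 4003 : set at (a+2001).toNat ≠ 0
    rw [Option.map_some]   -- ?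
    simp only [Option.getD_some]
    rw [List.getD_eq_getElem?_getD, List.getElem?_set_ne (by omega),
      ← List.getD_eq_getElem?_getD]
  · simp
  · -- negative in range : set at 4003 - (-(a+2001)).toNat ≥ 1
    simp only [Option.map_some, Option.getD_some]
    rw [List.getD_eq_getElem?_getD, List.getElem?_set_ne (by omega),
      ← List.getD_eq_getElem?_getD]
  · simp

theorem pvCounts_eq_foldl (arr : List Int) :
    pvCounts arr = arr.foldl pvCStep (List.replicate 4003 0) := rfl

theorem pvFoldl_cstep_length (arr : List Int) :
    ∀ init : List Int, (arr.foldl pvCStep init).length = init.length := by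
  induction arr with
  | nil => intro init; rfl
  | cons a arr ih =>
    intro init
    rw [List.foldl_cons, ih (pvCStep init a), pvCStep_length]

theorem pvCounts_length (arr : List Int) : (pvCounts arr).length = 4003 := by
  rw [pvCounts_eq_foldl, pvFoldl_cstep_length, List.length_replicate]

theorem pvCounts_getD_zero (arr : List Int)
    (h : ∀ a ∈ arr, a ≠ -2001 ∧ a ≠ -6004) : (pvCounts arr).getD 0 0 = 0 := by
  rw [pvCounts_eq_foldl]
  have : ∀ init : List Int, init.length = 4003 → init.getD 0 0 = 0 →
      (arr.foldl pvCStep init).getD 0 0 = 0 := by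
    induction arr with
    | nil => intro init _ h0; exact h0
    | cons a arr ih =>
      intro init hlen h0
      rw [List.foldl_cons]
      exact ih (fun b hb => h b (List.mem_cons_of_mem a hb)) (pvCStep init a)
        (by rw [pvCStep_length]; exact hlen)
        (by rw [pvCStep_getD_zero init a hlen (h a List.mem_cons_self).1
              (h a List.mem_cons_self).2]; exact h0)
  exact this (List.replicate 4003 0) (List.length_replicate)
    (by rw [List.getD_eq_getElem?_getD, List.getElem?_replicate, if_pos (by omega)]; rfl)

theorem pvPrefixLoop_eq (counts : List Int) (hlen : counts.length = 4003) :
    pvPrefixLoop counts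
      = (pvAcc (fun i => PySem.List.pyGetD counts i 0) 4003,
         pvAcc (fun i => PySem.List.pyGetD counts i 0 * i) 4003,
         pvAcc (fun i => PySem.List.pyGetD counts i 0 * (4002 - i)) 4003) := by
  rw [pvPrefixLoop, hlen]
  exact pvFoldl_prod3 (PySem.List.pyRange 0 (4003:Int) 1)
    (pvArrStep (fun i => PySem.List.pyGetD counts i 0))
    (pvArrStep (fun i => PySem.List.pyGetD counts i 0 * i))
    (pvArrStep (fun i => PySem.List.pyGetD counts i 0 * (4002 - i)))
    (List.replicate 4003 0) (List.replicate 4003 0) (List.replicate 4003 0)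

def pvFA (counts : List Int) (tot : Int) : Int :=
  let p := pvPrefixLoop counts
  let shift : Int := 2001 - tot
  let index : Int := max (min (2001 - tot) 4002) 0
  (PySem.List.pyGetD p.2.1 (-1) 0 - PySem.List.pyGetD p.2.1 index 0
    - shift * (PySem.List.pyGetD p.1 (-1) 0 - PySem.List.pyGetD p.1 index 0))
  + (PySem.List.pyGetD p.2.2 index 0 - (4002 - shift) * PySem.List.pyGetD p.1 index 0)

def pvFB (counts : List Int) (tot : Int) : Int :=
  let shift : Int := 2001 - tot
  (PySem.List.pyRange 0 4003 1).foldl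
    (fun acc i => acc + PySem.List.pyGetD counts i 0 * |i - shift|) 0

theorem pvFB_sum (counts : List Int) (tot : Int) :
    pvFB counts tot
      = ∑ k ∈ Finset.range 4003, counts.getD k 0 * |(k : Int) - (2001 - tot)| := by
  rw [pvFB]
  rw [PySem.List.foldl_add (PySem.List.pyRange 0 4003 1)]
  rw [PySem.List.pyRange_one 0 4003]
  norm_num [List.map_map]
  rw [show Int.toNat 4003 = 4003 from rfl]
  rw [pvListSumRange ((fun i => PySem.List.pyGetD counts i 0 * |i - (2001 - tot)|) ∘ fun k : Nat => (k:Int))]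
  exact Finset.sum_congr rfl (fun k _ => by simp [PySem.List.pyGetD_natCast])

theorem pvFA_expr (counts : List Int) (tot : Int) :
    pvFA counts tot
      = (PySem.List.pyGetD (pvPrefixLoop counts).2.1 (-1) 0
          - PySem.List.pyGetD (pvPrefixLoop counts).2.1 (max (min (2001 - tot) 4002) 0) 0
          - (2001 - tot) * (PySem.List.pyGetD (pvPrefixLoop counts).1 (-1) 0
              - PySem.List.pyGetD (pvPrefixLoop counts).1 (max (min (2001 - tot) 4002) 0) 0))
        + (PySem.List.pyGetD (pvPrefixLoop counts).2.2 (max (min (2001 - tot) 4002) 0) 0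
          - (4002 - (2001 - tot))
              * PySem.List.pyGetD (pvPrefixLoop counts).1 (max (min (2001 - tot) 4002) 0) 0) := rfl

theorem pvFA_eq_pvFB (counts : List Int) (tot : Int) (hlen : counts.length = 4003)
    (hside : counts.getD 0 0 = 0 ∨ tot ≤ 2001) : pvFA counts tot = pvFB counts tot := by
  have h0i : (0:Int) ≤ max (min (2001 - tot) 4002) 0 := le_max_right _ _
  have hi4002 : max (min (2001 - tot) 4002) 0 ≤ 4002 := by omega
  set shift : Int := 2001 - tot with hshift
  set index : Int := max (min shift 4002) 0 with hindex
  set n : Nat := index.toNat with hn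
  have hcast : (n : Int) = index := Int.toNat_of_nonneg h0i
  have hn4002 : n ≤ 4002 := by omega
  rw [pvFA_expr, pvPrefixLoop_eq counts hlen, pvFB_sum]
  simp only []
  rw [pvAcc_last, pvAcc_last,
    pvAcc_at _ index h0i hi4002, pvAcc_at _ index h0i hi4002, pvAcc_at _ index h0i hi4002]
  -- convert the three weighted prefix sums to sums over counts.getD
  have e1 : ∀ m : Nat, pvSum (fun i => PySem.List.pyGetD counts i 0) m
      = ∑ k ∈ Finset.range (m+1), counts.getD k 0 :=
    fun m => Finset.sum_congr rfl (fun k _ => by simp [PySem.List.pyGetD_natCast])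
  have e2 : ∀ m : Nat, pvSum (fun i => PySem.List.pyGetD counts i 0 * i) m
      = ∑ k ∈ Finset.range (m+1), counts.getD k 0 * (k:Int) :=
    fun m => Finset.sum_congr rfl (fun k _ => by simp [PySem.List.pyGetD_natCast])
  have e3 : ∀ m : Nat, pvSum (fun i => PySem.List.pyGetD counts i 0 * (4002 - i)) m
      = ∑ k ∈ Finset.range (m+1), counts.getD k 0 * (4002 - (k:Int)) :=
    fun m => Finset.sum_congr rfl (fun k _ => by simp [PySem.List.pyGetD_natCast])
  rw [e1, e1, e2, e2, e3]
  have hsplit : ∀ w : Nat → Int,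
      ∑ k ∈ Finset.range 4003, w k
        = ∑ k ∈ Finset.range (n+1), w k + ∑ k ∈ Finset.Ico (n+1) 4003, w k := by
    intro w
    rw [Finset.range_eq_Ico]
    exact (Finset.sum_Ico_consecutive w (Nat.zero_le _) (by omega)).symm
  have h4003 : (4002:Nat) + 1 = 4003 := rfl
  rw [h4003]
  -- the high part
  have hIco : ∑ k ∈ Finset.Ico (n+1) 4003, counts.getD k 0 * |(k:Int) - shift|
      = ∑ k ∈ Finset.Ico (n+1) 4003,
          (counts.getD k 0 * (k:Int) - shift * counts.getD k 0) := by
    refine Finset.sum_congr rfl (fun k hk => ?_)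
    rw [Finset.mem_Ico] at hk
    have hks : shift ≤ (k:Int) := by omega
    rw [abs_of_nonneg (by omega)]
    ring
  -- the low part
  have hLow : ∑ k ∈ Finset.range (n+1), counts.getD k 0 * |(k:Int) - shift|
      = ∑ k ∈ Finset.range (n+1),
          (counts.getD k 0 * (4002 - (k:Int)) - (4002 - shift) * counts.getD k 0) := by
    refine Finset.sum_congr rfl (fun k hk => ?_)
    rw [Finset.mem_range] at hk
    by_cases hs : 0 ≤ shift
    · have hks : (k:Int) ≤ shift := by omega
      rw [abs_of_nonpos (by omega)]
      ring
    · have hF0 : counts.getD 0 0 = 0 := by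
        rcases hside with h | h
        · exact h
        · exfalso; omega
      have hk0 : k = 0 := by omega
      subst hk0
      rw [hF0]
      ring
  rw [hsplit (fun k => counts.getD k 0 * |(k:Int) - shift|), hIco, hLow,
    hsplit (fun k => counts.getD k 0 * (k:Int)), hsplit (fun k => counts.getD k 0)]
  rw [Finset.sum_sub_distrib, Finset.sum_sub_distrib, ← Finset.mul_sum, ← Finset.mul_sum]
  ring

def pvQStep (f : Int → Int) (st : List Int × PySem.Dict Int Int × Int) (q : Int) :
    List Int × PySem.Dict Int Int × Int :=
  let tot := st.2.2 + q
  let cache := if (st.2.1.get? tot).isSome then st.2.1 else st.2.1.insert tot (f tot)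
  (st.1 ++ [cache.getD tot 0], cache, tot)

theorem pvQLoop_congr (f g : Int → Int) :
    ∀ (qs : List Int) (res : List Int) (cache : PySem.Dict Int Int) (tot : Int),
      (∀ k : Nat, k < qs.length → f (tot + (qs.take (k+1)).sum) = g (tot + (qs.take (k+1)).sum)) →
      qs.foldl (pvQStep f) (res, cache, tot) = qs.foldl (pvQStep g) (res, cache, tot) := by
  intro qs
  induction qs with
  | nil => intros; rfl
  | cons q qs ih =>
    intro res cache tot h
    have h0 : f (tot + q) = g (tot + q) := by
      have h' := h 0 (by simp)
      simpa using h'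
    rw [List.foldl_cons, List.foldl_cons]
    have hstep : pvQStep f (res, cache, tot) q = pvQStep g (res, cache, tot) q := by
      rw [pvQStep, pvQStep]
      simp only [h0]
    rw [hstep]
    have hx : pvQStep g (res, cache, tot) q
        = ((pvQStep g (res, cache, tot) q).1, (pvQStep g (res, cache, tot) q).2.1, tot + q) := rfl
    rw [hx]
    refine ih _ _ _ (fun k hk => ?_)
    have h' := h (k+1) (by simpa using Nat.succ_lt_succ hk)
    simpa [List.take_succ_cons, add_assoc] using h'


-- the two ports, re-expressed as folds of pvQStep over the per-total answer functions
theorem pvA_eq (arr queries : List Int) :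
    playingWithNumbers arr queries
      = (queries.foldl (pvQStep (pvFA (pvCounts arr))) ([], PySem.Dict.empty, 0)).1 := rfl

theorem pvB_eq (arr queries : List Int) :
    playingWithNumbers_alt arr queries
      = (queries.foldl (pvQStep (pvFB (pvCounts arr))) ([], PySem.Dict.empty, 0)).1 := rfl

theorem pvQLoop_out (f : Int → Int) :
    ∀ (qs : List Int) (res : List Int) (cache : PySem.Dict Int Int) (tot : Int),
      (∀ t v, cache.get? t = some v → v = f t) →
      (qs.foldl (pvQStep f) (res, cache, tot)).1
        = res ++ (List.range qs.length).map (fun k => f (tot + (qs.take (k+1)).sum)) := by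
  intro qs
  induction qs with
  | nil => intro res cache tot _; simp
  | cons q qs ih =>
    intro res cache tot hc
    rw [List.foldl_cons]
    have hval : (pvQStep f (res, cache, tot) q).1 = res ++ [f (tot + q)] := by
      rw [pvQStep]
      dsimp only
      by_cases h : (cache.get? (tot + q)).isSome = true
      · obtain ⟨v, hv⟩ := Option.isSome_iff_exists.mp h
        rw [if_pos h, PySem.Dict.getD_eq_get?_getD, hv, hc _ _ hv]
        rfl
      · rw [if_neg h, PySem.Dict.getD_insert_self]
    have hcache : ∀ t v, ((pvQStep f (res, cache, tot) q).2.1).get? t = some v → v = f t := by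
      intro t v hv
      rw [pvQStep] at hv
      dsimp only at hv
      by_cases h : (cache.get? (tot + q)).isSome = true
      · rw [if_pos h] at hv
        exact hc _ _ hv
      · rw [if_neg h, PySem.Dict.get?_insert] at hv
        by_cases ht : t = tot + q
        · rw [if_pos ht] at hv
          cases hv
          rw [ht]
        · rw [if_neg ht] at hv
          exact hc _ _ hv
    have hx : pvQStep f (res, cache, tot) q
        = ((pvQStep f (res, cache, tot) q).1, (pvQStep f (res, cache, tot) q).2.1, tot + q) := rfl
    rw [hx, ih _ _ _ hcache, hval]
    rw [List.length_cons, List.range_succ_eq_map, List.map_cons, List.map_map]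
    have h1 : f (tot + (List.take (0+1) (q :: qs)).sum) = f (tot + q) := by simp
    have h2 : List.map ((fun k => f (tot + (List.take (k+1) (q::qs)).sum)) ∘ Nat.succ)
          (List.range qs.length)
        = List.map (fun k => f (tot + q + (List.take (k+1) qs).sum)) (List.range qs.length) := by
      refine List.map_congr_left (fun k hk => ?_)
      simp [List.take_succ_cons, add_assoc]
    rw [h1, h2, List.append_assoc, List.singleton_append]

theorem pvCStep_zero (c : List Int) (a : Int) (hlen : c.length = 4003) :
    (pvCStep c a).getD 0 0
      = if a = -2001 ∨ a = -6004 then c.getD 0 0 + 1 else c.getD 0 0 := by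
  by_cases ha : a = -2001 ∨ a = -6004
  · rw [if_pos ha]
    have hidx : PySem.List.pyIdx? c.length (a + 2001) = some 0 := by
      rw [hlen, PySem.List.pyIdx?]
      rcases ha with rfl | rfl
      · norm_num
      · norm_num
    have hget : PySem.List.pyGetD c (a + 2001) 0 = c.getD 0 0 := by
      rw [PySem.List.pyGetD, PySem.List.pyGet?, hidx, Option.bind_some,
        List.getD_eq_getElem?_getD]
    rw [pvCStep, PySem.List.pySetD, PySem.List.pySet?, hidx, Option.map_some,
      Option.getD_some, hget, List.getD_eq_getElem?_getD, List.getElem?_set,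
      if_pos rfl, if_pos (by omega)]
    rfl
  · rw [if_neg ha]
    exact pvCStep_getD_zero c a hlen
      (fun h => ha (Or.inl h)) (fun h => ha (Or.inr h))

theorem pvFoldl_cstep_zero_mono (arr : List Int) :
    ∀ init : List Int, init.length = 4003 →
      init.getD 0 0 ≤ (arr.foldl pvCStep init).getD 0 0 := by
  induction arr with
  | nil => intro init _; exact le_refl _
  | cons a arr ih =>
    intro init hlen
    rw [List.foldl_cons]
    refine le_trans ?_ (ih (pvCStep init a) (by rw [pvCStep_length]; exact hlen))
    rw [pvCStep_zero init a hlen]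
    split_ifs <;> omega

theorem pvCounts_getD_zero_pos (arr : List Int)
    (hmem : (-2001 : Int) ∈ arr ∨ (-6004 : Int) ∈ arr) :
    1 ≤ (pvCounts arr).getD 0 0 := by
  rw [pvCounts_eq_foldl]
  have key : ∀ (l : List Int) (init : List Int), init.length = 4003 → 0 ≤ init.getD 0 0 →
      ((-2001 : Int) ∈ l ∨ (-6004 : Int) ∈ l) →
      1 ≤ (l.foldl pvCStep init).getD 0 0 := by
    intro l
    induction l with
    | nil => intro init _ _ hm; rcases hm with hm | hm <;> simp at hm
    | cons a arr ih =>
      intro init hlen h0 hm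
      rw [List.foldl_cons]
      by_cases ha : a = -2001 ∨ a = -6004
      · refine le_trans ?_ (pvFoldl_cstep_zero_mono arr (pvCStep init a)
          (by rw [pvCStep_length]; exact hlen))
        rw [pvCStep_zero init a hlen, if_pos ha]
        omega
      · have hm' : (-2001 : Int) ∈ arr ∨ (-6004 : Int) ∈ arr := by
          rcases hm with hm | hm
          · rcases List.mem_cons.mp hm with rfl | hm
            · exact absurd (Or.inl rfl) ha
            · exact Or.inl hm
          · rcases List.mem_cons.mp hm with rfl | hm
            · exact absurd (Or.inr rfl) ha
            · exact Or.inr hm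
        refine ih (pvCStep init a) (by rw [pvCStep_length]; exact hlen) ?_ hm'
        rw [pvCStep_zero init a hlen, if_neg ha]
        exact h0
  exact key arr (List.replicate 4003 0) List.length_replicate
    (by rw [List.getD_eq_getElem?_getD, List.getElem?_replicate, if_pos (by omega)]; exact le_refl _)
    hmem

theorem pvFB_sub_pvFA (counts : List Int) (tot : Int) (hlen : counts.length = 4003)
    (ht : 2001 < tot) :
    pvFB counts tot - pvFA counts tot = 2 * (tot - 2001) * counts.getD 0 0 := by
  have hidx : max (min (2001 - tot) 4002) 0 = 0 := by omega
  rw [pvFA_expr, pvPrefixLoop_eq counts hlen, pvFB_sum]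
  simp only [hidx]
  rw [pvAcc_last, pvAcc_last,
    pvAcc_at _ 0 (le_refl 0) (by norm_num), pvAcc_at _ 0 (le_refl 0) (by norm_num),
    pvAcc_at _ 0 (le_refl 0) (by norm_num)]
  rw [show (0:Int).toNat = 0 from rfl]
  have e1 : ∀ m : Nat, pvSum (fun i => PySem.List.pyGetD counts i 0) m
      = ∑ k ∈ Finset.range (m+1), counts.getD k 0 :=
    fun m => Finset.sum_congr rfl (fun k _ => by simp [PySem.List.pyGetD_natCast])
  have e2 : ∀ m : Nat, pvSum (fun i => PySem.List.pyGetD counts i 0 * i) m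
      = ∑ k ∈ Finset.range (m+1), counts.getD k 0 * (k:Int) :=
    fun m => Finset.sum_congr rfl (fun k _ => by simp [PySem.List.pyGetD_natCast])
  have e3 : ∀ m : Nat, pvSum (fun i => PySem.List.pyGetD counts i 0 * (4002 - i)) m
      = ∑ k ∈ Finset.range (m+1), counts.getD k 0 * (4002 - (k:Int)) :=
    fun m => Finset.sum_congr rfl (fun k _ => by simp [PySem.List.pyGetD_natCast])
  rw [e1, e1, e2, e2, e3]
  have hsplit : ∀ w : Nat → Int,
      ∑ k ∈ Finset.range 4003, w k
        = ∑ k ∈ Finset.range 1, w k + ∑ k ∈ Finset.Ico 1 4003, w k := by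
    intro w
    rw [Finset.range_eq_Ico]
    exact (Finset.sum_Ico_consecutive w (Nat.zero_le _) (by omega)).symm
  have h4003 : (4002:Nat) + 1 = 4003 := rfl
  have h1 : (0:Nat) + 1 = 1 := rfl
  rw [h4003, h1]
  have hIco : ∑ k ∈ Finset.Ico 1 4003, counts.getD k 0 * |(k:Int) - (2001 - tot)|
      = ∑ k ∈ Finset.Ico 1 4003,
          (counts.getD k 0 * (k:Int) - (2001 - tot) * counts.getD k 0) := by
    refine Finset.sum_congr rfl (fun k hk => ?_)
    rw [Finset.mem_Ico] at hk
    rw [abs_of_nonneg (by omega)]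
    ring
  rw [hsplit (fun k => counts.getD k 0 * |(k:Int) - (2001 - tot)|), hIco,
    hsplit (fun k => counts.getD k 0 * (k:Int)), hsplit (fun k => counts.getD k 0)]
  rw [Finset.sum_range_one, Finset.sum_range_one, Finset.sum_range_one, Finset.sum_range_one]
  rw [Finset.sum_sub_distrib, ← Finset.mul_sum]
  rw [show |((0:Nat):Int) - (2001 - tot)| = tot - 2001 from by
    rw [abs_of_nonneg (by push_cast; omega)]; push_cast; ring]
  push_cast
  ring

theorem pvTight (arr queries : List Int)
    (hD : (((-2001:Int) ∈ arr ∨ (-6004:Int) ∈ arr) ∧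
      ∃ k ∈ List.range (queries.length+1), 2001 < (queries.take k).sum)) :
    (queries.foldl (pvQStep (pvFA (pvCounts arr))) ([], PySem.Dict.empty, 0)).1
      ≠ (queries.foldl (pvQStep (pvFB (pvCounts arr))) ([], PySem.Dict.empty, 0)).1 := by
  obtain ⟨hmem, k, hkr, hgt⟩ := hD
  rw [List.mem_range] at hkr
  have hk1 : 1 ≤ k := by
    rcases Nat.eq_zero_or_pos k with rfl | h
    · rw [List.take_zero] at hgt; simp at hgt
    · exact h
  intro heq
  have hempA : ∀ t v, (PySem.Dict.empty : PySem.Dict Int Int).get? t = some v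
      → v = pvFA (pvCounts arr) t := by
    intro t v hv; rw [PySem.Dict.get?_empty] at hv; cases hv
  have hempB : ∀ t v, (PySem.Dict.empty : PySem.Dict Int Int).get? t = some v
      → v = pvFB (pvCounts arr) t := by
    intro t v hv; rw [PySem.Dict.get?_empty] at hv; cases hv
  rw [pvQLoop_out _ queries [] _ 0 hempA, pvQLoop_out _ queries [] _ 0 hempB,
    List.nil_append, List.nil_append] at heq
  have hlt : k - 1 < queries.length := by omega
  have h1 := congrArg (fun l => l[k-1]?) heq
  simp only [List.getElem?_map] at h1
  rw [List.getElem?_range hlt] at h1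
  simp only [Option.map_some, Option.some.injEq] at h1
  rw [Nat.sub_add_cancel hk1, zero_add] at h1
  have hlen := pvCounts_length arr
  have hsub := pvFB_sub_pvFA (pvCounts arr) ((queries.take k).sum) hlen hgt
  have hpos := pvCounts_getD_zero_pos arr hmem
  rw [h1] at hsub
  nlinarith [hsub, hpos, hgt]

-- computations at the difference witness ([-2001], [3000])
theorem pvCW_eq : pvCounts [-2001] = (List.replicate 4003 0).set 0 1 := by
  rw [pvCounts_eq_foldl, List.foldl_cons, List.foldl_nil, pvCStep]
  have h1 : (-2001 : Int) + 2001 = 0 := by norm_num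
  rw [h1, PySem.List.pyGetD_zero]
  have h2 : (List.replicate 4003 (0:Int)).getD 0 0 + 1 = 1 := by
    rw [List.getD_eq_getElem?_getD, List.getElem?_replicate, if_pos (by omega)]
    rfl
  rw [h2, PySem.List.pySetD, PySem.List.pySet?, PySem.List.pyIdx?]
  norm_num

theorem pvCW_getD (k : Nat) (hk : k < 4003) :
    (pvCounts [-2001]).getD k 0 = if k = 0 then 1 else 0 := by
  rw [pvCW_eq, List.getD_eq_getElem?_getD, List.getElem?_set]
  rcases eq_or_ne k 0 with rfl | hne
  · rw [if_pos rfl, List.length_replicate, if_pos (by omega), if_pos rfl]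
    rfl
  · rw [if_neg (by omega), if_neg hne, List.getElem?_replicate, if_pos hk]
    rfl

theorem pvCW_sum1 (m : Nat) (hm : m ≤ 4002) :
    pvSum (fun i => PySem.List.pyGetD (pvCounts [-2001]) i 0) m = 1 := by
  rw [pvSum]
  have hc : ∑ k ∈ Finset.range (m+1), PySem.List.pyGetD (pvCounts [-2001]) (k : Int) 0
      = ∑ k ∈ Finset.range (m+1), (if k = 0 then (1:Int) else 0) :=
    Finset.sum_congr rfl (fun k hk => by
      rw [Finset.mem_range] at hk
      rw [PySem.List.pyGetD_natCast, pvCW_getD k (by omega)])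
  rw [hc, Finset.sum_ite_eq' (Finset.range (m+1)) 0 (fun _ => (1:Int)),
    if_pos (Finset.mem_range.mpr (by omega))]

theorem pvCW_sum2 (m : Nat) (hm : m ≤ 4002) :
    pvSum (fun i => PySem.List.pyGetD (pvCounts [-2001]) i 0 * i) m = 0 := by
  rw [pvSum]
  refine Finset.sum_eq_zero (fun k hk => ?_)
  rw [Finset.mem_range] at hk
  show PySem.List.pyGetD (pvCounts [-2001]) (k : Int) 0 * (k : Int) = 0
  rw [PySem.List.pyGetD_natCast, pvCW_getD k (by omega)]
  rcases eq_or_ne k 0 with rfl | hne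
  · simp
  · rw [if_neg hne]; ring

theorem pvCW_sum3 : pvSum (fun i => PySem.List.pyGetD (pvCounts [-2001]) i 0 * (4002 - i)) 0 = 4002 := by
  rw [pvSum, Finset.sum_range_one]
  show PySem.List.pyGetD (pvCounts [-2001]) ((0:Nat) : Int) 0 * (4002 - ((0:Nat):Int)) = 4002
  rw [PySem.List.pyGetD_natCast, pvCW_getD 0 (by omega)]
  norm_num

theorem pvW_FA : pvFA (pvCounts [-2001]) 3000 = -999 := by
  have hlen : (pvCounts [-2001]).length = 4003 := pvCounts_length _
  rw [pvFA_expr, pvPrefixLoop_eq _ hlen]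
  have hidx : max (min (2001 - (3000:Int)) 4002) 0 = 0 := by norm_num
  simp only [hidx]
  rw [pvAcc_last, pvAcc_last, pvAcc_at _ 0 (le_refl 0) (by norm_num),
    pvAcc_at _ 0 (le_refl 0) (by norm_num), pvAcc_at _ 0 (le_refl 0) (by norm_num)]
  rw [show (0:Int).toNat = 0 from rfl]
  rw [pvCW_sum1 4002 (by omega), pvCW_sum1 0 (by omega), pvCW_sum2 4002 (by omega),
    pvCW_sum2 0 (by omega), pvCW_sum3]
  norm_num

theorem pvW_FB : pvFB (pvCounts [-2001]) 3000 = 999 := by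
  rw [pvFB_sum]
  have hc : ∑ k ∈ Finset.range 4003, (pvCounts [-2001]).getD k 0 * |(k:Int) - (2001 - 3000)|
      = ∑ k ∈ Finset.range 4003, (if k = 0 then (999:Int) else 0) :=
    Finset.sum_congr rfl (fun k hk => by
      rw [Finset.mem_range] at hk
      rw [pvCW_getD k hk]
      rcases eq_or_ne k 0 with rfl | hne
      · norm_num
      · rw [if_neg hne, if_neg hne]; ring)
  rw [hc, Finset.sum_ite_eq' (Finset.range 4003) 0 (fun _ => (999:Int)),
    if_pos (Finset.mem_range.mpr (by omega))]

theorem pvSingleFold (f : Int → Int) :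
    ([(3000:Int)].foldl (pvQStep f) ([], PySem.Dict.empty, 0)).1 = [f 3000] := by
  rw [List.foldl_cons, List.foldl_nil, pvQStep]
  have h0 : (0:Int) + 3000 = 3000 := by norm_num
  simp only [h0, PySem.Dict.get?_empty, Option.isSome_none, Bool.false_eq_true, if_false,
    PySem.Dict.getD_insert_self]
  rfl

-- ===== VERDICT (by name: the statement is the Claim_ definition above) =====
theorem playingWithNumbers_spec : Claim_unchanged_playingWithNumbers := by
  intro arr queries _hDom _hPre hnD
  rw [pvA_eq, pvB_eq]
  have hlen := pvCounts_length arr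
  refine congrArg Prod.fst (pvQLoop_congr _ _ queries [] PySem.Dict.empty 0 ?_)
  intro k hk
  by_cases hmem : (-2001 : Int) ∈ arr ∨ (-6004 : Int) ∈ arr
  · -- every cumulative total stays ≤ 2001
    have hq : ¬ 2001 < (queries.take (k+1)).sum := by
      intro hgt
      exact hnD ⟨hmem, ⟨k+1, List.mem_range.mpr (by omega), hgt⟩⟩
    exact pvFA_eq_pvFB _ _ hlen (Or.inr (by omega))
  · -- histogram bucket 0 is empty
    have hF0 : (pvCounts arr).getD 0 0 = 0 :=
      pvCounts_getD_zero arr (fun a ha =>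
        ⟨fun e => hmem (Or.inl (e ▸ ha)), fun e => hmem (Or.inr (e ▸ ha))⟩)
    exact pvFA_eq_pvFB _ _ hlen (Or.inl hF0)

theorem playingWithNumbers_changed : Claim_changed_playingWithNumbers := by
  unfold Claim_changed_playingWithNumbers
  refine ⟨by decide, by decide, by decide, ?_, ?_, by decide⟩
  · show playingWithNumbers [-2001] [3000] = [-999]
    rw [pvA_eq, pvSingleFold, pvW_FA]
  · show playingWithNumbers_alt [-2001] [3000] = [999]
    rw [pvB_eq, pvSingleFold, pvW_FB]

theorem playingWithNumbers_tight : Claim_exact_playingWithNumbers := by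
  intro arr queries _hDom _hPre hD
  rw [pvA_eq, pvB_eq]
  exact pvTight arr queries hD
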